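-- pv_equiv track=rewrite | github.com/yishawnpeng/makeSP | makeSP.py | CheckSPName
-- ===== SOURCE A (Python) =====
-- def CheckSPName(spFolderName) :
--     if spFolderName[0:2] not in {"SP", "sp", "Sp", "sP"} :
--         return False
--     elif len(spFolderName) not in {8,10} : # _1
--         return False
--     for i in range(2,len(spFolderName)) :
--         if not spFolderName[i] in [chr(i + 48) for i in range(10)] and spFolderName[i] != "_" :
--             return False
--     return True
-- ===== SOURCE B (Python) =====
-- def CheckSPName(spFolderName):
--     # Recursive-descent validation as one boolean expression: length gate first,
--     # case-insensitive prefix compare via .lower(), then recursive tail consumption.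
--     def tail_ok(s):
--         if s == "":
--             return True
--         return ('0' <= s[0] <= '9' or s[0] == '_') and tail_ok(s[1:])
--     return (len(spFolderName) in (8, 10)
--             and spFolderName[:2].lower() == "sp"
--             and tail_ok(spFolderName[2:]))
-- ===== Notes on version B (the rewrite author's own statement) =====
-- stated objective: alternative
-- what changed: A's early-return chain with an index loop that rebuilds the chr digit list per character is replaced by a single boolean expression: length gate first, case-normalised prefix via .lower() compared to the expected lowercase prefix, and a recursive tail consumer testing each character by a decimal-digit range comparison; it trades A's 4-way prefix set and per-index loop for case-folding and structural recursion.
import Mathlib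
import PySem

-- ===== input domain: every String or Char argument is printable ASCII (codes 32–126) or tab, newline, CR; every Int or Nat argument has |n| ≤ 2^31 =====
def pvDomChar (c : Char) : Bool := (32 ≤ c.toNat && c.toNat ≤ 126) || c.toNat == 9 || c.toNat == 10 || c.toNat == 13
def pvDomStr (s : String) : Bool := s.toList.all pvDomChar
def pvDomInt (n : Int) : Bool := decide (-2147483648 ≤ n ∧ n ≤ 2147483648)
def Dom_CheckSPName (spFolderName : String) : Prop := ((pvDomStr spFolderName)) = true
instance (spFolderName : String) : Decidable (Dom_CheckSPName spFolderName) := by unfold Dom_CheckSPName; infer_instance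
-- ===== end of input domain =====

-- B validates by a different decomposition: one boolean expression that gates on length first,
-- compares a case-normalised (.lower()) prefix against the expected lowercase prefix, and consumes the
-- tail by recursion with a digit range test, instead of A's early-return chain with an index loop over a rebuilt chr list.


-- ===== PORT A =====
def CheckSPName (spFolderName : String) : Bool :=
  let cs := spFolderName.toList
  -- if spFolderName[0:2] not in {"SP","sp","Sp","sP"} : return False
  if ¬ (PySem.Chars.slice cs (some 0) (some 2) ∈
        [['S','P'], ['s','p'], ['S','p'], ['s','P']]) then
    false
  -- elif len(spFolderName) not in {8,10} : return False
  else if ¬ (cs.length = 8 ∨ cs.length = 10) then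
    false
  -- for i in range(2,len(spFolderName)) : … ; return True
  else
    (PySem.List.pyRange 2 (cs.length : Int) 1).all (fun i =>
      let c := PySem.List.pyGetD cs i ' '
      ¬ (¬ (c ∈ (PySem.List.pyRange 0 10 1).map (fun j => Char.ofNat (j.toNat + 48)))
          ∧ c ≠ '_'))

-- ===== PORT B =====
-- def tail_ok(s): if s == "": return True; return ('0'<=s[0]<='9' or s[0]=='_') and tail_ok(s[1:])
def pvTailOk : List Char → Bool
  | [] => true
  | c :: rest => ((decide ('0' ≤ c) && decide (c ≤ '9')) || c == '_') && pvTailOk rest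

def CheckSPName_alt (spFolderName : String) : Bool :=
  let cs := spFolderName.toList
  -- len(spFolderName) in (8,10) and spFolderName[:2].lower() == "sp" and tail_ok(spFolderName[2:])
  (cs.length == 8 || cs.length == 10)
  && (PySem.Chars.lower (PySem.Chars.slice cs none (some 2)) == ['s','p'])
  && pvTailOk (PySem.Chars.slice cs (some 2) none)

-- ===== PRECONDITION & SPEC =====
def Spec_CheckSPName (spFolderName : String) (out : Bool) : Prop := out = CheckSPName_alt spFolderName
instance (spFolderName : String) (out : Bool) : Decidable (Spec_CheckSPName spFolderName out) := by unfold Spec_CheckSPName; infer_instance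

-- ===== CLAIM (what is proved, stated in full; the proofs are below) =====
def Claim_equal_CheckSPName : Prop := ∀ (spFolderName : String), Dom_CheckSPName spFolderName → Spec_CheckSPName spFolderName (CheckSPName spFolderName)

-- ===== LEMMAS AND PROOFS =====

lemma char_eq_of_toNat_eq {c d : Char} (h : c.toNat = d.toNat) : c = d :=
  Char.ext (UInt32.toNat_inj.mp (by simpa using h))

-- lowerChar c = 's' exactly for 'S' and 's'
lemma lowerChar_s (c : Char) : PySem.Chars.lowerChar c = 's' ↔ c = 'S' ∨ c = 's' := by
  constructor
  · intro h
    unfold PySem.Chars.lowerChar at h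
    split at h
    · rename_i hu
      simp only [PySem.Chars.isupper, Bool.and_eq_true, decide_eq_true_eq] at hu
      obtain ⟨hu1, hu2⟩ := hu
      rw [Char.le_def, UInt32.le_iff_toNat_le] at hu1 hu2
      have hA : 'A'.val.toNat = 65 := rfl
      have hZ : 'Z'.val.toNat = 90 := rfl
      have hcv : c.val.toNat = c.toNat := rfl
      have hv : Nat.isValidChar (c.toNat + 32) := Or.inl (by omega)
      have ht : (Char.ofNat (c.toNat + 32)).toNat = c.toNat + 32 := by
        rw [Char.toNat_ofNat, if_pos hv]
      have h115 : c.toNat + 32 = 115 := by rw [← ht, h]; rfl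
      have hS : 'S'.toNat = 83 := rfl
      exact Or.inl (char_eq_of_toNat_eq (by omega))
    · exact Or.inr h
  · rintro (rfl | rfl) <;> decide

-- lowerChar c = 'p' exactly for 'P' and 'p'
lemma lowerChar_p (c : Char) : PySem.Chars.lowerChar c = 'p' ↔ c = 'P' ∨ c = 'p' := by
  constructor
  · intro h
    unfold PySem.Chars.lowerChar at h
    split at h
    · rename_i hu
      simp only [PySem.Chars.isupper, Bool.and_eq_true, decide_eq_true_eq] at hu
      obtain ⟨hu1, hu2⟩ := hu
      rw [Char.le_def, UInt32.le_iff_toNat_le] at hu1 hu2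
      have hA : 'A'.val.toNat = 65 := rfl
      have hZ : 'Z'.val.toNat = 90 := rfl
      have hcv : c.val.toNat = c.toNat := rfl
      have hv : Nat.isValidChar (c.toNat + 32) := Or.inl (by omega)
      have ht : (Char.ofNat (c.toNat + 32)).toNat = c.toNat + 32 := by
        rw [Char.toNat_ofNat, if_pos hv]
      have h112 : c.toNat + 32 = 112 := by rw [← ht, h]; rfl
      have hP : 'P'.toNat = 80 := rfl
      exact Or.inl (char_eq_of_toNat_eq (by omega))
    · exact Or.inr h
  · rintro (rfl | rfl) <;> decide

-- the two prefix tests agree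
lemma prefix_eq (a b : Char) :
    ([a, b] ∈ [['S','P'], ['s','p'], ['S','p'], ['s','P']]) ↔
    PySem.Chars.lower [a, b] = ['s','p'] := by
  have hl : PySem.Chars.lower [a, b] = [PySem.Chars.lowerChar a, PySem.Chars.lowerChar b] := rfl
  rw [hl]
  simp only [List.mem_cons, List.cons.injEq, and_true, List.not_mem_nil, or_false]
  rw [lowerChar_s, lowerChar_p]
  constructor
  · rintro (⟨rfl, rfl⟩ | ⟨rfl, rfl⟩ | ⟨rfl, rfl⟩ | ⟨rfl, rfl⟩) <;> simp
  · rintro ⟨(rfl | rfl), (rfl | rfl)⟩ <;> simp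

-- the explicit digit list of A equals the '0'..'9' range test
lemma mem_digits_iff (c : Char) :
    c ∈ ['0','1','2','3','4','5','6','7','8','9'] ↔ ('0' ≤ c ∧ c ≤ '9') := by
  constructor
  · intro h
    fin_cases h <;> exact ⟨by decide, by decide⟩
  · rintro ⟨h1, h2⟩
    rw [Char.le_def, UInt32.le_iff_toNat_le] at h1 h2
    have h0 : '0'.val.toNat = 48 := rfl
    have h9 : '9'.val.toNat = 57 := rfl
    have hcv : c.val.toNat = c.toNat := rfl
    have hv : Nat.isValidChar c.toNat := Or.inl (by omega)
    have hc : c = Char.ofNat c.toNat :=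
      char_eq_of_toNat_eq (by rw [Char.toNat_ofNat, if_pos hv])
    rw [hc]
    have hd : c.toNat = 48 ∨ c.toNat = 49 ∨ c.toNat = 50 ∨ c.toNat = 51 ∨ c.toNat = 52 ∨
        c.toNat = 53 ∨ c.toNat = 54 ∨ c.toNat = 55 ∨ c.toNat = 56 ∨ c.toNat = 57 := by omega
    rcases hd with h|h|h|h|h|h|h|h|h|h <;> rw [h] <;> decide

-- the two per-character tests agree
lemma char_pred_eq (c : Char) :
    (decide (¬ (¬ (c ∈ (PySem.List.pyRange 0 10 1).map (fun j => Char.ofNat (j.toNat + 48)))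
        ∧ c ≠ '_')))
    = (((decide ('0' ≤ c) && decide (c ≤ '9')) || c == '_')) := by
  have hdig : (PySem.List.pyRange 0 10 1).map (fun j => Char.ofNat (j.toNat + 48))
      = ['0','1','2','3','4','5','6','7','8','9'] := by decide
  rw [hdig]
  by_cases hm : c ∈ ['0','1','2','3','4','5','6','7','8','9']
  · obtain ⟨h1, h2⟩ := (mem_digits_iff c).mp hm
    simp [hm, h1, h2]
  · have hnr : ¬ ('0' ≤ c ∧ c ≤ '9') := fun h => hm ((mem_digits_iff c).mpr h)
    by_cases hu : c = '_'
    · simp [hu]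
    · have hb : (decide ('0' ≤ c) && decide (c ≤ '9')) = false := by
        rcases Decidable.not_and_iff_or_not.mp hnr with h | h <;> simp [h]
      simp [hm, hu, hb]

-- pvTailOk is the all-characters test
lemma pvTailOk_eq_all (l : List Char) :
    pvTailOk l = l.all (fun c => ((decide ('0' ≤ c) && decide (c ≤ '9')) || c == '_')) := by
  induction l with
  | nil => rfl
  | cons c rest ih => simp [pvTailOk, ih]

-- the tail validations of the two ports coincide
lemma tail_eq (cs : List Char) :
    ((PySem.List.pyRange 2 (cs.length : Int) 1).all (fun i =>
      let c := PySem.List.pyGetD cs i ' '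
      ¬ (¬ (c ∈ (PySem.List.pyRange 0 10 1).map (fun j => Char.ofNat (j.toNat + 48)))
          ∧ c ≠ '_')))
    = pvTailOk (PySem.Chars.slice cs (some 2) none) := by
  have hdrop : (PySem.List.pyRange 2 (cs.length : Int) 1).map
      (fun j => PySem.List.pyGetD cs j ' ') = cs.drop 2 := by
    simpa using PySem.List.map_pyGetD_pyRange' (xs := cs) (d := ' ') (a := 2) (by omega)
  have hslice : PySem.Chars.slice cs (some 2) none = cs.drop 2 := by
    simp [PySem.Chars.slice, PySem.List.slice_from (a := (2:Int)) (by omega)]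
  rw [hslice, pvTailOk_eq_all, ← hdrop, List.all_map]
  apply congrArg
  funext i
  simp only [Function.comp]
  exact char_pred_eq (PySem.List.pyGetD cs i ' ')

-- ===== VERDICT (by name: the statement is the Claim_ definition above) =====
theorem CheckSPName_spec : Claim_equal_CheckSPName := by
  intro s _
  show CheckSPName s = CheckSPName_alt s
  simp only [CheckSPName, CheckSPName_alt]
  by_cases hL : s.toList.length = 8 ∨ s.toList.length = 10
  · -- length admissible: the list has at least two characters
    have h2 : 2 ≤ s.toList.length := by rcases hL with h | h <;> omega
    obtain ⟨a, b, rest, hcs⟩ : ∃ a b rest, s.toList = a :: b :: rest := by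
      cases hx : s.toList with
      | nil => rw [hx] at h2; simp at h2
      | cons a t =>
        cases t with
        | nil => rw [hx] at h2; simp at h2
        | cons b rest => exact ⟨a, b, rest, rfl⟩
    have htake : PySem.List.slice (a :: b :: rest) none (some 2) = [a, b] := by
      have h02 := PySem.List.slice_to_natCast (xs := a :: b :: rest) (b := 2)
      norm_num at h02
      simp [h02]
    have hsl2 : PySem.Chars.slice s.toList (some 0) (some 2) = [a, b] := by
      simp [PySem.Chars.slice, hcs, htake]
    have hslB : PySem.Chars.slice s.toList none (some 2) = [a, b] := by
      simp [PySem.Chars.slice, hcs, htake]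
    have hLb : (s.toList.length == 8 || s.toList.length == 10) = true := by
      rcases hL with h | h <;> simp [h]
    rw [hsl2, hslB, hLb]
    by_cases hP : [a, b] ∈ [['S','P'], ['s','p'], ['S','p'], ['s','P']]
    · have hlow : PySem.Chars.lower [a, b] = ['s','p'] := (prefix_eq a b).mp hP
      rw [if_neg (not_not_intro hP), if_neg (not_not_intro hL), hlow]
      simpa using tail_eq s.toList
    · have hlow : ¬ PySem.Chars.lower [a, b] = ['s','p'] :=
        fun h => hP ((prefix_eq a b).mpr h)
      rw [if_pos hP]
      simp [hlow]
  · -- length inadmissible: both sides are false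
    have hfalse : (s.toList.length == 8 || s.toList.length == 10) = false := by
      simp only [Bool.or_eq_false_iff, beq_eq_false_iff_ne, ne_eq]
      exact ⟨fun h => hL (Or.inl h), fun h => hL (Or.inr h)⟩
    simp only [hfalse, Bool.false_and]
    by_cases hP : PySem.Chars.slice s.toList (some 0) (some 2) ∈
        [['S','P'], ['s','p'], ['S','p'], ['s','P']]
    · rw [if_neg (not_not_intro hP), if_pos hL]
    · rw [if_pos hP]
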